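-- pv_equiv track=rewrite | github.com/1xiaosongz/lll | 5860.py | simple_extract_3
-- ===== SOURCE A (Python) =====
-- def simple_extract_3(arr):
--     """
--     简化版本：执行两次差值计算并提取元素
--     """
--
--     def one_pass(current_arr):
--         extracted = []
--         i = 0
--         while i < len(current_arr) - 1:
--             if current_arr[i + 1] - current_arr[i] < 300:
--                 extracted.append(current_arr[i + 1])
--                 current_arr.pop(i + 1)
--             else:
--                 i += 1
--         return extracted
--
--     remaining = arr.copy()
--     first_extracted = one_pass(remaining)
--     second_extracted = one_pass(remaining)
--
--     return remaining, first_extracted + second_extracted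
-- ===== SOURCE B (Python) =====
-- def simple_extract_3(arr):
--     """Single linear scan per pass (no list.pop): build kept/extracted lists directly."""
--     def one_pass(xs):
--         if not xs:
--             return [], []
--         kept = [xs[0]]
--         extracted = []
--         anchor = xs[0]
--         for x in xs[1:]:
--             if x - anchor < 300:
--                 extracted.append(x)
--             else:
--                 kept.append(x)
--                 anchor = x
--         return kept, extracted
--     r1, e1 = one_pass(arr)
--     r2, e2 = one_pass(r1)
--     return r2, e1 + e2
-- ===== Notes on version B (the rewrite author's own statement) =====
-- stated objective: faster
-- what changed: Replaces the quadratic while-loop that repeatedly list.pop's near elements with a single linear scan per pass that appends each element to either the kept or the extracted list while tracking the current anchor.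
import Mathlib
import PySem

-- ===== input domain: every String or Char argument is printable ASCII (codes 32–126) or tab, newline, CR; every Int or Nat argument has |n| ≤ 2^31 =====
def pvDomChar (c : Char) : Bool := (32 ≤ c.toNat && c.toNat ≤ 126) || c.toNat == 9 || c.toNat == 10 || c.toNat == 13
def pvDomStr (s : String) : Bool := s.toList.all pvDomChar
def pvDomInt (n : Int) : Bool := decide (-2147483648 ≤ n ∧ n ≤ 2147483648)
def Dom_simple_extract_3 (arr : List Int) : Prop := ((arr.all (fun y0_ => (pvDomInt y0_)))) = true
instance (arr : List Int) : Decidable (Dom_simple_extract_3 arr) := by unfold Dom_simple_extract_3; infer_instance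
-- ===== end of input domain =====

-- B replaces A's quadratic while-loop with repeated list.pop by one linear scan per pass
-- that appends to kept/extracted lists while tracking the current anchor (asymptotically faster).

-- ===== PORT A =====
-- A's while loop over a mutable list: state = (current list, index i, extracted-so-far).
-- Indices i and i+1 are in range under the guard, so List.getD is exact for current_arr[i];
-- current_arr.pop(i+1) with i+1 in range is exactly List.eraseIdx at i+1.
def onePassA (cur : List Int) (i : Nat) (ext : List Int) : List Int × List Int :=
  if h : i + 1 < cur.length then
    if cur.getD (i + 1) 0 - cur.getD i 0 < 300 then
      onePassA (cur.eraseIdx (i + 1)) i (ext ++ [cur.getD (i + 1) 0])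
    else
      onePassA cur (i + 1) ext
  else
    (cur, ext)
termination_by cur.length - i
decreasing_by
  · simp [List.length_eraseIdx, h]; omega
  · omega

def simple_extract_3 (arr : List Int) : List Int × List Int :=
  let p1 := onePassA arr 0 []
  let p2 := onePassA p1.1 0 []
  (p2.1, p1.2 ++ p2.2)

-- ===== PORT B =====
-- B's single for-loop per pass: fold over the tail with state (kept-rev, extracted-rev, anchor).
def onePassB (xs : List Int) : List Int × List Int :=
  match xs with
  | [] => ([], [])
  | x :: rest =>
    let s := rest.foldl
      (fun (s : List Int × List Int × Int) y =>
        if y - s.2.2 < 300 then (s.1, y :: s.2.1, s.2.2) else (y :: s.1, s.2.1, y))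
      ([x], [], x)
    (s.1.reverse, s.2.1.reverse)

def simple_extract_3_alt (arr : List Int) : List Int × List Int :=
  let p1 := onePassB arr
  let p2 := onePassB p1.1
  (p2.1, p1.2 ++ p2.2)

-- ===== PRECONDITION & SPEC =====
def Spec_simple_extract_3 (arr : List Int) (out : List Int × List Int) : Prop := out = simple_extract_3_alt arr
instance (arr : List Int) (out : List Int × List Int) : Decidable (Spec_simple_extract_3 arr out) := by unfold Spec_simple_extract_3; infer_instance

-- ===== CLAIM (what is proved, stated in full; the proofs are below) =====
def Claim_equal_simple_extract_3 : Prop := ∀ (arr : List Int), Dom_simple_extract_3 arr → Spec_simple_extract_3 arr (simple_extract_3 arr)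

-- ===== LEMMAS AND PROOFS =====

-- Reference one-pass recursion both ports are related to.
def goB (a : Int) : List Int → List Int × List Int
  | [] => ([], [])
  | y :: ys =>
    if y - a < 300 then
      let p := goB a ys; (p.1, y :: p.2)
    else
      let p := goB y ys; (y :: p.1, p.2)

theorem getD_at_len (p : List Int) (a : Int) (r : List Int) :
    (p ++ a :: r).getD p.length 0 = a := by
  induction p with
  | nil => rfl
  | cons x xs ih => simp [ih]

theorem eraseIdx_at_len (p : List Int) (y : Int) (r : List Int) :
    (p ++ y :: r).eraseIdx p.length = p ++ r := by
  induction p with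
  | nil => rfl
  | cons x xs ih => simpa [List.eraseIdx] using ih

theorem onePassA_go (rest : List Int) : ∀ (p : List Int) (a : Int) (ext : List Int),
    onePassA (p ++ a :: rest) p.length ext
      = (p ++ a :: (goB a rest).1, ext ++ (goB a rest).2) := by
  induction rest with
  | nil =>
    intro p a ext
    rw [onePassA]
    have h : ¬ (p.length + 1 < (p ++ [a]).length) := by simp
    simp [goB]
  | cons y ys ih =>
    intro p a ext
    rw [onePassA]
    have h : p.length + 1 < (p ++ a :: y :: ys).length := by simp
    have h1 : (p ++ a :: y :: ys).getD p.length 0 = a := getD_at_len p a _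
    have h2 : (p ++ a :: y :: ys).getD (p.length + 1) 0 = y := by
      have := getD_at_len (p ++ [a]) y ys
      simpa using this
    have h3 : (p ++ a :: y :: ys).eraseIdx (p.length + 1) = p ++ a :: ys := by
      have := eraseIdx_at_len (p ++ [a]) y ys
      simpa using this
    by_cases hc : y - a < 300
    · simp only [h, dif_pos, h1, h2, h3, if_pos hc]
      rw [ih p a (ext ++ [y])]
      simp [goB, hc]
    · simp only [h, dif_pos, h1, h2, if_neg hc]
      have := ih (p ++ [a]) y ext
      simp only [List.length_append, List.length_cons, List.length_nil] at this
      rw [show (p ++ [a]) ++ y :: ys = p ++ a :: y :: ys by simp] at this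
      rw [this]
      simp [goB, hc]

theorem onePassB_fold (ys : List Int) : ∀ (k e : List Int) (a : Int),
    (let s := ys.foldl
        (fun (s : List Int × List Int × Int) y =>
          if y - s.2.2 < 300 then (s.1, y :: s.2.1, s.2.2) else (y :: s.1, s.2.1, y))
        (k, e, a)
     (s.1.reverse, s.2.1.reverse))
      = (k.reverse ++ (goB a ys).1, e.reverse ++ (goB a ys).2) := by
  induction ys with
  | nil => intro k e a; simp [goB]
  | cons y ys ih =>
    intro k e a
    by_cases hc : y - a < 300
    · simp only [List.foldl_cons, if_pos hc]
      rw [ih (k) (y :: e) a]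
      simp [goB, hc]
    · simp only [List.foldl_cons, if_neg hc]
      rw [ih (y :: k) e y]
      simp [goB, hc]

theorem onePassB_eq (xs : List Int) :
    onePassB xs = match xs with
      | [] => ([], [])
      | x :: rest => (x :: (goB x rest).1, (goB x rest).2) := by
  cases xs with
  | nil => rfl
  | cons x rest =>
    show (let s := rest.foldl _ ([x], [], x); (s.1.reverse, s.2.1.reverse)) = _
    rw [onePassB_fold rest [x] [] x]
    simp

theorem onePass_agree (xs : List Int) : onePassA xs 0 [] = onePassB xs := by
  cases xs with
  | nil => rw [onePassA]; simp [onePassB]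
  | cons x rest =>
    have := onePassA_go rest [] x []
    simp only [List.nil_append, List.length_nil] at this
    rw [this, onePassB_eq]

-- ===== VERDICT (by name: the statement is the Claim_ definition above) =====
theorem simple_extract_3_spec : Claim_equal_simple_extract_3 := by
  intro arr _
  unfold Spec_simple_extract_3 simple_extract_3 simple_extract_3_alt
  simp only [onePass_agree]
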